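-- pv_equiv track=rewrite | github.com/novaeco-tech/novaeco-devtools | novaeco-cli/src/novaeco_cli/commands/workspace.py | categorize_repos
-- ===== SOURCE A (Python) =====
-- TOPIC_PRIORITY = [
--     "meta",  # e.g., .github, governance repos
--     "novaeco",  # e.g., novaeco repositories
-- ]
--
-- def categorize_repos(repo_list):
--     """Sorts repositories into buckets based on TOPIC_PRIORITY.
--     Unmatched repos are placed in an 'other' bucket."""
--
--     # Initialize buckets for priority topics + a catch-all 'other'
--     categorized = {topic: [] for topic in TOPIC_PRIORITY}
--     categorized["other"] = []
--
--     for repo in repo_list: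
--         # Handle case where GitHub returns explicit null for empty topics
--         raw_topics = repo.get("repositoryTopics") or []
--         repo_topics = [t["name"] for t in raw_topics]
--
--         matched = False
--
--         # Check topics in priority order
--         for topic in TOPIC_PRIORITY:
--             if topic in repo_topics:
--                 categorized[topic].append(repo)
--                 matched = True
--                 break
--
--         # If no priority topic matched, add to 'other' for tracking/warning
--         if not matched:
--             categorized["other"].append(repo)
--
--     return categorized
-- ===== SOURCE B (Python) =====
-- TOPIC_PRIORITY = [
--     "meta",
--     "novaeco",
-- ]
--
-- def categorize_repos(repo_list):
--     """Sorts repositories into buckets based on TOPIC_PRIORITY.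
--     Unmatched repos are placed in an 'other' bucket."""
--     prio = {topic: i for i, topic in enumerate(TOPIC_PRIORITY)}
--     categorized = {topic: [] for topic in TOPIC_PRIORITY}
--     categorized["other"] = []
--     for repo in repo_list:
--         names = [t["name"] for t in (repo.get("repositoryTopics") or [])]
--         best = min((prio[n] for n in names if n in prio), default=None)
--         bucket = TOPIC_PRIORITY[best] if best is not None else "other"
--         categorized[bucket].append(repo)
--     return categorized
-- ===== Notes on version B (the rewrite author's own statement) =====
-- stated objective: idiomatic
-- what changed: Instead of scanning TOPIC_PRIORITY per repo with a membership test and a matched flag, B builds a topic->priority-index dict once and picks each repo's bucket as the min priority index among the repo's own topics (default 'other').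
import Mathlib
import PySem

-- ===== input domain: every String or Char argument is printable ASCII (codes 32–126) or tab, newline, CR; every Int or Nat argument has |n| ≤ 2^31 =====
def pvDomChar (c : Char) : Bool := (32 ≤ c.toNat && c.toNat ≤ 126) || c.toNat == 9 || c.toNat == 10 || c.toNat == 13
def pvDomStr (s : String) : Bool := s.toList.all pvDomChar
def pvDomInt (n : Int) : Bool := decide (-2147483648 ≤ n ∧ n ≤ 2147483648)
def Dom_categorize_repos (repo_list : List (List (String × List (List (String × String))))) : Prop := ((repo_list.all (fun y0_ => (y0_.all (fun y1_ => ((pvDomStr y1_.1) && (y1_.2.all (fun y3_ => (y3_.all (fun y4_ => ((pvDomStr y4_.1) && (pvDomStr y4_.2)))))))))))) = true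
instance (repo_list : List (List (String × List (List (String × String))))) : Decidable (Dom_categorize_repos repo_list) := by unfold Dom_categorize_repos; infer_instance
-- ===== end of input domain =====

-- B replaces A's per-repo scan of the priority list by a priority-index lookup with min (idiomatic); return values proved equal on Pre_.

abbrev PvRepo : Type := List (String × List (List (String × String)))

def pvTopicPriority : List String := ["meta", "novaeco"]

-- ===== PORT A =====
-- inner 'for topic in TOPIC_PRIORITY: if topic in repo_topics: …; break' with the matched flag
def pvCatLoopA (repo : PvRepo) (repo_topics : List String) :
    List String → PySem.Dict String (List PvRepo) → PySem.Dict String (List PvRepo) × Bool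
  | [], cat => (cat, false)
  | topic :: rest, cat =>
      if repo_topics.contains topic then
        (cat.modify topic [] (fun l => l ++ [repo]), true)
      else pvCatLoopA repo repo_topics rest cat

def categorize_repos (repo_list : List (List (String × List (List (String × String))))) : List (String × List (List (String × List (List (String × String))))) :=
  let cat0 := (pvTopicPriority.foldl (fun d topic => d.insert topic []) PySem.Dict.empty).insert "other" []
  let catF := repo_list.foldl (fun cat repo =>
    let raw_topics := ((PySem.Dict.mk repo).get? "repositoryTopics").getD []
    -- t["name"]: total via getD "" — Pre_ guarantees the key is present, where Python would otherwise raise KeyError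
    let repo_topics := raw_topics.map (fun t => ((PySem.Dict.mk t).get? "name").getD "")
    let res := pvCatLoopA repo repo_topics pvTopicPriority cat
    if res.2 then res.1 else cat.modify "other" [] (fun l => l ++ [repo])) cat0
  catF.items

-- ===== PORT B =====
def categorize_repos_alt (repo_list : List (List (String × List (List (String × String))))) : List (String × List (List (String × List (List (String × String))))) :=
  let prio := (PySem.List.enumerate pvTopicPriority).foldl (fun d p => d.insert p.2 p.1) PySem.Dict.empty
  let cat0 := (pvTopicPriority.foldl (fun d topic => d.insert topic []) PySem.Dict.empty).insert "other" []
  let catF := repo_list.foldl (fun cat repo =>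
    let names := (((PySem.Dict.mk repo).get? "repositoryTopics").getD []).map
      (fun t => ((PySem.Dict.mk t).get? "name").getD "")
    let best := PySem.List.min? (names.filterMap (fun n => prio.get? n)) (fun x => x)
    -- TOPIC_PRIORITY[best]: index always in range, total via pyGetD ""
    let bucket := match best with
      | some i => PySem.List.pyGetD pvTopicPriority i ""
      | none => "other"
    cat.modify bucket [] (fun l => l ++ [repo])) cat0
  catF.items

-- ===== PRECONDITION & SPEC =====
-- Pre_ excludes exactly the inputs where Python A raises KeyError: a topic dict without a "name" key.
def Pre_categorize_repos (repo_list : List (List (String × List (List (String × String))))) : Prop :=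
  ∀ repo ∈ repo_list, ∀ t ∈ (((PySem.Dict.mk repo).get? "repositoryTopics").getD ([] : List (List (String × String)))),
    (PySem.Dict.mk t).contains "name" = true
instance (repo_list : List (List (String × List (List (String × String))))) : Decidable (Pre_categorize_repos repo_list) := by unfold Pre_categorize_repos; infer_instance

def pvWitness_categorize_repos : (List (List (String × List (List (String × String))))) :=
  [[("repositoryTopics", [[("name", "meta")]])], [("repositoryTopics", [])]]

def Spec_categorize_repos (repo_list : List (List (String × List (List (String × String))))) (out : List (String × List (List (String × List (List (String × String)))))) : Prop := out = categorize_repos_alt repo_list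
-- instance search gives up at this nesting depth; compose the DecidableEq instance by hand
instance (repo_list : List (List (String × List (List (String × String))))) (out : List (String × List (List (String × List (List (String × String)))))) : Decidable (Spec_categorize_repos repo_list out) := by
  unfold Spec_categorize_repos
  exact @instDecidableEqList _
    (@instDecidableEqProd _ _ inferInstance (@instDecidableEqList _ inferInstance))
    out (categorize_repos_alt repo_list)

-- ===== CLAIM (what is proved, stated in full; the proofs are below) =====
def Claim_equal_categorize_repos : Prop := ∀ (repo_list : List (List (String × List (List (String × String))))), Dom_categorize_repos repo_list → Pre_categorize_repos repo_list → Spec_categorize_repos repo_list (categorize_repos repo_list)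

-- ===== LEMMAS AND PROOFS =====

-- value of B's priority dict at any key
lemma pv_prio_get (n : String) :
    (((PySem.List.enumerate pvTopicPriority).foldl
        (fun d p => d.insert p.2 p.1) PySem.Dict.empty).get? n)
      = if n = "novaeco" then some 1 else if n = "meta" then some 0 else none := by
  show ((PySem.Dict.empty.insert "meta" 0).insert "novaeco" 1).get? n = _
  rw [PySem.Dict.get?_insert, PySem.Dict.get?_insert]
  simp [PySem.Dict.get?_empty]

-- running-min loop over the 0/1 priority indices, generalized accumulator
-- (f is min?'s foldl body, taken abstractly so the lemma applies to PySem's compiled match)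
lemma pv_min_fold (f : Option Int → Int → Option Int)
    (hf : ∀ a x, f a x = match a with
      | none => some x
      | some m => if x < m then some x else some m)
    (names : List String) (a : Option Int)
    (ha : a = none ∨ a = some 0 ∨ a = some 1) :
    List.foldl f a (names.filterMap (fun n => if n = "novaeco" then some (1 : Int) else if n = "meta" then some 0 else none))
    = if a = some 0 ∨ names.contains "meta" then some 0
      else if a = some 1 ∨ names.contains "novaeco" then some 1
      else none := by
  induction names generalizing a with
  | nil =>
      simp only [List.filterMap_nil, List.foldl_nil, List.contains_nil]
      rcases ha with h | h | h <;> simp [h]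
  | cons x rest ih =>
      by_cases hx : x = "novaeco"
      · subst hx
        have hstep : f a 1 = if a = some 0 then some 0 else some 1 := by
          rw [hf]; rcases ha with h | h | h <;> simp [h]
        simp only [List.filterMap_cons, String.reduceEq, reduceIte, List.foldl_cons, hstep]
        by_cases h0 : a = some 0
        · rw [if_pos h0, ih (some 0) (by simp), if_pos (Or.inl rfl)]
          simp [h0]
        · rw [if_neg h0, ih (some 1) (by simp)]
          simp [h0]
      · by_cases hm : x = "meta"
        · subst hm
          have hstep : f a 0 = some 0 := by
            rw [hf]; rcases ha with h | h | h <;> simp [h]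
          simp only [List.filterMap_cons, String.reduceEq, reduceIte, List.foldl_cons, hstep]
          rw [ih (some 0) (by simp)]
          simp
        · have hx' : ¬ ("novaeco" = x) := fun h => hx h.symm
          have hm' : ¬ ("meta" = x) := fun h => hm h.symm
          simp only [List.filterMap_cons, if_neg hx, if_neg hm]
          rw [ih a ha]
          simp [hx', hm']

-- per-repo step functions of the two folds agree
lemma pv_step_eq :
    (fun (cat : PySem.Dict String (List PvRepo)) (repo : PvRepo) =>
      let raw_topics := ((PySem.Dict.mk repo).get? "repositoryTopics").getD []
      let repo_topics := raw_topics.map (fun t => ((PySem.Dict.mk t).get? "name").getD "")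
      let res := pvCatLoopA repo repo_topics pvTopicPriority cat
      if res.2 then res.1 else cat.modify "other" [] (fun l => l ++ [repo]))
    = (fun (cat : PySem.Dict String (List PvRepo)) (repo : PvRepo) =>
      let names := (((PySem.Dict.mk repo).get? "repositoryTopics").getD []).map
        (fun t => ((PySem.Dict.mk t).get? "name").getD "")
      let best := PySem.List.min? (names.filterMap (fun n =>
        (((PySem.List.enumerate pvTopicPriority).foldl
          (fun d p => d.insert p.2 p.1) PySem.Dict.empty).get? n))) (fun x => x)
      let bucket := match best with
        | some i => PySem.List.pyGetD pvTopicPriority i ""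
        | none => "other"
      cat.modify bucket [] (fun l => l ++ [repo])) := by
  funext cat repo
  simp only []
  set names := (((PySem.Dict.mk repo).get? "repositoryTopics").getD []).map
    (fun t => ((PySem.Dict.mk t).get? "name").getD "") with hnames
  have hf : (fun n => (((PySem.List.enumerate pvTopicPriority).foldl
        (fun d p => d.insert p.2 p.1) PySem.Dict.empty).get? n))
      = fun n => if n = "novaeco" then some (1 : Int) else if n = "meta" then some 0 else none := by
    funext n; exact pv_prio_get n
  rw [hf]
  have hmin : PySem.List.min?
      (names.filterMap (fun n => if n = "novaeco" then some (1 : Int) else if n = "meta" then some 0 else none))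
      (fun x => x)
      = if (none : Option Int) = some 0 ∨ names.contains "meta" then some 0
        else if (none : Option Int) = some 1 ∨ names.contains "novaeco" then some 1
        else none := by
    have hbody : PySem.List.min?
        (names.filterMap (fun n => if n = "novaeco" then some (1 : Int) else if n = "meta" then some 0 else none))
        (fun x => x)
        = List.foldl (fun acc x => match acc with
            | none => some x
            | some m => if x < m then some x else some m) none
          (names.filterMap (fun n => if n = "novaeco" then some (1 : Int) else if n = "meta" then some 0 else none)) := by
      unfold PySem.List.min?
      congr 1
      funext acc x
      cases acc <;> rfl
    rw [hbody]
    exact pv_min_fold _ (fun a x => rfl) names none (Or.inl rfl)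
  rw [hmin]
  have hg0 : PySem.List.pyGetD ["meta", "novaeco"] (0 : Int) "" = "meta" := by decide
  have hg1 : PySem.List.pyGetD ["meta", "novaeco"] (1 : Int) "" = "novaeco" := by decide
  by_cases hm : "meta" ∈ names
  · simp [pvCatLoopA, pvTopicPriority, hm, hg0]
  · by_cases hn : "novaeco" ∈ names
    · simp [pvCatLoopA, pvTopicPriority, hm, hn, hg1]
    · simp [pvCatLoopA, pvTopicPriority, hm, hn]

-- ===== VERDICT (by name: the statement is the Claim_ definition above) =====
theorem categorize_repos_spec : Claim_equal_categorize_repos := by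
  intro repo_list _ _
  show categorize_repos repo_list = categorize_repos_alt repo_list
  unfold categorize_repos categorize_repos_alt
  rw [pv_step_eq]
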